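-- pv_equiv track=rewrite | github.com/njcuk9999/apero-drs | INTROOT/misc/main_drs_trigger.py | recipe_mode_3
-- ===== SOURCE A (Python) =====
-- def recipe_mode_3(req, nfiles):
--     # Way 4: recipe requires multiple runs with multiple suffices
--     suffices = req['dstring']
--     sfiles = []
--     # loop around suffixes
--     for suffix in suffices:
--         ufiles = []
--         # loop around files and add files that have this suffix
--         for filename in nfiles:
--             if suffix in filename:
--                 ufiles.append(str(filename))
--             elif suffix == 'None':
--                 ufiles.append(str(filename))
--         sfiles.append(ufiles)
--     if len(sfiles) == 0:
--         return []
--     # should just use the first one of each argument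
--     only_run = []
--     for s_it in range(len(suffices)):
--         try:
--             only_run.append(str(sfiles[s_it][0]))
--         except IndexError:
--             return []
--     # return runs
--     return [only_run]
-- ===== SOURCE B (Python) =====
-- def recipe_mode_3(req, nfiles):
--     suffices = req['dstring']
--     if not suffices:
--         return []
--     only_run = []
--     for suffix in suffices:
--         first = next((str(f) for f in nfiles if suffix in f or suffix == 'None'), None)
--         if first is None:
--             return []
--         only_run.append(first)
--     return [only_run]
-- ===== Notes on version B (the rewrite author's own statement) =====
-- stated objective: simpler
-- what changed: A builds the full list-of-lists of every matching file per suffix and then indexes [0] under a try/except IndexError; B makes a single pass taking the first match per suffix directly via next(...) and returns [] immediately when a suffix has no match, never materialising the discarded matches.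
import Mathlib
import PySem

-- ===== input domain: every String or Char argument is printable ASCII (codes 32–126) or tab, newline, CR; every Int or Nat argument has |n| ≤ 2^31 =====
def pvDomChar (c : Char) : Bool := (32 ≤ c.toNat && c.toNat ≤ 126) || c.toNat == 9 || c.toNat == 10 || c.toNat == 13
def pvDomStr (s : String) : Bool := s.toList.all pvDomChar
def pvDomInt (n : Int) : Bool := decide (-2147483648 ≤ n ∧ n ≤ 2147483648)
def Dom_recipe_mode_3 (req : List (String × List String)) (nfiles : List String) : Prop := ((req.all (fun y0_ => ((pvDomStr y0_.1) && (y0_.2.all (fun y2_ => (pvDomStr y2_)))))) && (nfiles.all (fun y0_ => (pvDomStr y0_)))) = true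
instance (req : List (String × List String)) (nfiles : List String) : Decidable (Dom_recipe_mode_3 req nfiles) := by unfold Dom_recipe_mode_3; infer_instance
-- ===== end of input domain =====

-- B collapses A's two phases (collect all matches per suffix, then index [0] under try/except)
-- into one pass that takes the first match per suffix directly; simpler decomposition, same result.


-- ===== PORT A =====
-- second loop of A: 'for s_it in range(len(suffices)): try only_run.append(sfiles[s_it][0]) except IndexError: return []';
-- the index walk over sfiles (same length as suffices) is the obvious structural recursion over sfiles
def recipeA_pick : List (List String) → List String → List (List String)
  | [], only_run => [only_run]
  | u :: rest, only_run =>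
    match u.head? with           -- sfiles[s_it][0]; none = IndexError → return []
    | none => []
    | some v => recipeA_pick rest (only_run ++ [v])

def recipe_mode_3 (req : List (String × List String)) (nfiles : List String) : List (List String) :=
  match req.find? (fun p => p.1 == "dstring") with   -- req['dstring']; KeyError excluded by Pre_
  | none => []
  | some p =>
    let sufs := p.2
    let sfiles := sufs.foldl (fun sf sfx =>
      sf ++ [nfiles.foldl (fun uf filename =>
        if PySem.Str.isIn sfx filename then uf ++ [filename]
        else if sfx == "None" then uf ++ [filename]
        else uf) []]) []
    if sfiles.length == 0 then []
    else recipeA_pick sfiles []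

-- ===== PORT B =====
-- B's loop: for each suffix take the first matching file; bail out with [] when there is none
def recipeB_loop (nfiles : List String) : List String → List String → List (List String)
  | [], only_run => [only_run]
  | sfx :: rest, only_run =>
    match nfiles.find? (fun f => PySem.Str.isIn sfx f || sfx == "None") with
    | none => []
    | some f => recipeB_loop nfiles rest (only_run ++ [f])

def recipe_mode_3_alt (req : List (String × List String)) (nfiles : List String) : List (List String) :=
  match req.find? (fun p => p.1 == "dstring") with   -- req['dstring']; KeyError excluded by Pre_
  | none => []
  | some p =>
    if p.2 = [] then []
    else recipeB_loop nfiles p.2 []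

-- ===== PRECONDITION & SPEC =====
-- Pre_ excludes exactly the inputs where req has no 'dstring' key, on which Python A raises KeyError.
def Pre_recipe_mode_3 (req : List (String × List String)) (nfiles : List String) : Prop :=
  "dstring" ∈ req.map Prod.fst
instance (req : List (String × List String)) (nfiles : List String) : Decidable (Pre_recipe_mode_3 req nfiles) := by unfold Pre_recipe_mode_3; infer_instance
def pvWitness_recipe_mode_3 : (List (String × List String)) × List String :=
  ([("dstring", ["a", "None"])], ["xay", "zz"])

def Spec_recipe_mode_3 (req : List (String × List String)) (nfiles : List String) (out : List (List String)) : Prop := out = recipe_mode_3_alt req nfiles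
instance (req : List (String × List String)) (nfiles : List String) (out : List (List String)) : Decidable (Spec_recipe_mode_3 req nfiles out) := by unfold Spec_recipe_mode_3; infer_instance

-- ===== CLAIM (what is proved, stated in full; the proofs are below) =====
def Claim_equal_recipe_mode_3 : Prop := ∀ (req : List (String × List String)) (nfiles : List String), Dom_recipe_mode_3 req nfiles → Pre_recipe_mode_3 req nfiles → Spec_recipe_mode_3 req nfiles (recipe_mode_3 req nfiles)

-- ===== LEMMAS AND PROOFS =====

-- A's inner loop appends exactly the files satisfying the match predicate: it is a filter
theorem recipeA_inner_eq_filter (sfx : String) (nfiles u0 : List String) :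
    nfiles.foldl (fun uf filename =>
        if PySem.Str.isIn sfx filename then uf ++ [filename]
        else if sfx == "None" then uf ++ [filename]
        else uf) u0
      = u0 ++ nfiles.filter (fun f => PySem.Str.isIn sfx f || sfx == "None") := by
  induction nfiles generalizing u0 with
  | nil => simp
  | cons f rest ih =>
    rw [List.foldl_cons, ih, List.filter_cons]
    by_cases h1 : PySem.Str.isIn sfx f = true
    · rw [if_pos h1, if_pos (by rw [h1]; rfl : (PySem.Str.isIn sfx f || sfx == "None") = true)]
      rw [List.append_assoc, List.singleton_append]
    · rw [if_neg h1]
      by_cases h2 : (sfx == "None") = true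
      · rw [if_pos h2,
          if_pos (by rw [h2, Bool.or_true] : (PySem.Str.isIn sfx f || sfx == "None") = true)]
        rw [List.append_assoc, List.singleton_append]
      · rw [if_neg h2, if_neg (by
          rw [Bool.or_eq_true]
          rintro (h | h)
          exacts [h1 h, h2 h])]

-- first element of the filtered list = first matching element
theorem head?_filter_eq_find? {α : Type} (p : α → Bool) (xs : List α) :
    (xs.filter p).head? = xs.find? p := by
  induction xs with
  | nil => rfl
  | cons x rest ih =>
    rw [List.filter_cons, List.find?_cons]
    by_cases h : p x = true
    · rw [if_pos h, h, List.head?_cons]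
    · rw [if_neg h, Bool.not_eq_true] at *
      rw [h, ih]

-- picking the head of each filtered list = B's loop taking the first match directly
theorem recipeA_pick_eq_loop (nfiles : List String) (sufs acc : List String) :
    recipeA_pick (sufs.map (fun s =>
        nfiles.filter (fun f => PySem.Str.isIn s f || s == "None"))) acc
      = recipeB_loop nfiles sufs acc := by
  induction sufs generalizing acc with
  | nil => rfl
  | cons s rest ih =>
    rw [List.map_cons]
    show (match (nfiles.filter (fun f => PySem.Str.isIn s f || s == "None")).head? with
      | none => []
      | some v => recipeA_pick (rest.map _) (acc ++ [v])) = _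
    rw [head?_filter_eq_find? (fun f => PySem.Str.isIn s f || s == "None") nfiles]
    unfold recipeB_loop
    cases nfiles.find? (fun f => PySem.Str.isIn s f || s == "None") with
    | none => rfl
    | some f => exact ih (acc ++ [f])

-- A's outer loop builds exactly the list of filtered lists
theorem recipeA_outer_eq_map (nfiles : List String) (sufs : List String)
    (sf0 : List (List String)) :
    sufs.foldl (fun sf sfx =>
      sf ++ [nfiles.foldl (fun uf filename =>
        if PySem.Str.isIn sfx filename then uf ++ [filename]
        else if sfx == "None" then uf ++ [filename]
        else uf) []]) sf0
    = sf0 ++ sufs.map (fun s =>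
        nfiles.filter (fun f => PySem.Str.isIn s f || s == "None")) := by
  induction sufs generalizing sf0 with
  | nil => rw [List.foldl_nil, List.map_nil, List.append_nil]
  | cons s rest ih =>
    rw [List.foldl_cons, ih, recipeA_inner_eq_filter, List.nil_append, List.map_cons,
      List.append_assoc, List.singleton_append]

-- ===== VERDICT (by name: the statement is the Claim_ definition above) =====
theorem recipe_mode_3_spec : Claim_equal_recipe_mode_3 := by
  intro req nfiles _ _
  unfold Spec_recipe_mode_3 recipe_mode_3 recipe_mode_3_alt
  cases hf : req.find? (fun p => p.1 == "dstring") with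
  | none => rfl
  | some p =>
    simp only [recipeA_outer_eq_map, List.nil_append]
    cases hsuf : p.2 with
    | nil => rfl
    | cons s rest =>
      rw [if_neg (by simp), if_neg (by simp)]
      exact recipeA_pick_eq_loop nfiles (s :: rest) []
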